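-- pv_equiv track=rewrite | github.com/LouisNight/python_lab5 | Week5Lab_python.py | ip_convert
-- ===== SOURCE A (Python) =====
-- def is_valid_part(part):
--     if not part.isdigit():
--         return False
--     num = int(part)
--     if num < 0 or num > 255:
--         return False
--     if part[0] == '0' and len(part) > 1:
--         return False
--     return True
--
-- def is_valid_ip(ip):
--     parts = ip.split('.')
--     if len(parts) != 4:
--         return False
--     for part in parts:
--         if not is_valid_part(part):
--             return False
--     return True
--
-- def decimal_to_binary(n):
--     if n == 0:
--         return "0"
--     if n == 1:
--         return "1"
--     return decimal_to_binary(n // 2) + str(n % 2)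
--
-- def binary_to_decimal(b):
--     if b == "":
--         return 0
--     return int(b[0]) * (2 ** (len(b) - 1)) + binary_to_decimal(b[1:])
--
-- def ip_to_binary(ip):
--     if not is_valid_ip(ip):
--         return "Invalid IP address"
--
--     parts = ip.split('.')
--     binary_parts = [decimal_to_binary(int(part)).zfill(8) for part in parts]
--     return '.'.join(binary_parts)
--
-- def ip_convert(ip):
--     def is_binary_ip(ip):
--         parts = ip.split('.')
--         for part in parts:
--             if not all(c in '01' for c in part):
--                 return False
--         return True
--
--     if is_binary_ip(ip):
--         parts = ip.split('.')
--         decimal_parts = [str(binary_to_decimal(part)) for part in parts]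
--         return '.'.join(decimal_parts)
--     else:
--         return ip_to_binary(ip)
-- ===== SOURCE B (Python) =====
-- def ip_convert(ip):
--     parts = ip.split('.')
--     if all(all(c in '01' for c in p) for p in parts):
--         out = []
--         for p in parts:
--             acc = 0
--             for c in p:
--                 acc = acc * 2 + (1 if c == '1' else 0)
--             out.append(str(acc))
--         return '.'.join(out)
--     if len(parts) != 4:
--         return "Invalid IP address"
--     out = []
--     for p in parts:
--         if not p.isdigit():
--             return "Invalid IP address"
--         n = int(p)
--         if n > 255 or (p[0] == '0' and len(p) > 1):
--             return "Invalid IP address"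
--         bits = ""
--         while n > 0:
--             bits = str(n % 2) + bits
--             n //= 2
--         out.append(bits.rjust(8, '0'))
--     return '.'.join(out)
-- ===== Notes on version B (the rewrite author's own statement) =====
-- stated objective: alternative
-- what changed: Replaces A's recursive base-conversion helpers and validate-then-reconvert pipeline with single-pass iterative loops: Horner accumulator for binary-to-decimal, repeated divmod building the bit string plus rjust(8) for decimal-to-binary, and validation fused with conversion in one pass over the parts with early return.
import Mathlib
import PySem

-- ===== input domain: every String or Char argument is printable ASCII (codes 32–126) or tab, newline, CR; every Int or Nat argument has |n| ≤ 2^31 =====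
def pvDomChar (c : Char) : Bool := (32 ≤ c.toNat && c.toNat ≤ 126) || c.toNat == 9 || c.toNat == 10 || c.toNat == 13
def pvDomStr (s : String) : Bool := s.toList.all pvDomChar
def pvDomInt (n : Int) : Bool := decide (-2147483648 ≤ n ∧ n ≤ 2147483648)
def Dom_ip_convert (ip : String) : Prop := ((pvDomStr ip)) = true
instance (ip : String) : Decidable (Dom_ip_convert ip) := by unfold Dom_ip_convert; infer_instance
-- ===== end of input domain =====

-- B replaces A's two recursive base-conversion helpers and its validate-then-reconvert pipeline by
-- single-pass iterative loops (Horner accumulator for binary→decimal, repeated divmod for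
-- decimal→binary, validation fused with conversion in one pass); same values everywhere (objective: alternative).

-- ===== PORT A =====
def pvInvalid : List Char := "Invalid IP address".toList

-- part.isdigit() : nonempty and all chars decimal digits (exact on the ASCII domain)
def pvStrIsdigit (p : List Char) : Bool := !p.isEmpty && p.all PySem.Chars.isdigit

-- is_valid_part
def pvIsValidPart (part : List Char) : Bool :=
  if !pvStrIsdigit part then false
  else
    -- int(part): never raises here since part.isdigit() holds, so getD 0 is exact
    let num : Int := (PySem.Int.ofChars? part).getD 0
    if num < 0 ∨ num > 255 then false
    else if PySem.List.pyGet? part 0 = some '0' ∧ PySem.List.len part > 1 then false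
    else true

-- is_valid_ip
def pvIsValidIp (ip : List Char) : Bool :=
  let parts := PySem.Chars.splitOn ip ['.']
  if parts.length ≠ 4 then false
  else parts.all pvIsValidPart

-- decimal_to_binary, on Nat: exact for the nonnegative ints it is applied to
-- (A only calls it on int(part) with part.isdigit(), so the argument is ≥ 0)
def pvDtb (n : Nat) : List Char :=
  if n = 0 then ['0']
  else if n = 1 then ['1']
  else pvDtb (n / 2) ++ PySem.Int.toChars ((n % 2 : Nat) : Int)
decreasing_by exact Nat.div_lt_self (by omega) (by omega)

-- binary_to_decimal; int(b[0]) ported as code-48, exact for the digit chars it is applied to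
def pvBtd : List Char → Int
  | [] => 0
  | c :: rest => ((c.toNat : Int) - 48) * 2 ^ rest.length + pvBtd rest

-- ip_to_binary
def pvIpToBinary (ip : List Char) : List Char :=
  if !pvIsValidIp ip then pvInvalid
  else
    let parts := PySem.Chars.splitOn ip ['.']
    PySem.Chars.join ['.']
      (parts.map (fun p => PySem.Chars.zfill (pvDtb ((PySem.Int.ofChars? p).getD 0).toNat) 8))

-- is_binary_ip ('c in "01"' is c = '0' or c = '1' for a single char)
def pvIsBinaryIp (ip : List Char) : Bool :=
  (PySem.Chars.splitOn ip ['.']).all (fun p => p.all (fun c => c == '0' || c == '1'))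

def ip_convert (ip : String) : String :=
  if pvIsBinaryIp ip.toList then
    String.mk (PySem.Chars.join ['.']
      ((PySem.Chars.splitOn ip.toList ['.']).map (fun p => PySem.Int.toChars (pvBtd p))))
  else String.mk (pvIpToBinary ip.toList)

-- ===== PORT B =====
-- acc = 0; for c in p: acc = acc*2 + (1 if c == '1' else 0)
def pvB_btd (p : List Char) : Int :=
  p.foldl (fun acc c => acc * 2 + (if c = '1' then 1 else 0)) 0

-- bits.rjust(8, '0')
def pvRjust8 (s : List Char) : List Char := List.replicate (8 - s.length) '0' ++ s

-- while n > 0: bits = str(n % 2) + bits; n //= 2  — on Nat, exact since n = int(p) ≥ 0 here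
def pvB_bits (n : Nat) (acc : List Char) : List Char :=
  if n = 0 then acc
  else pvB_bits (n / 2) (PySem.Int.toChars ((n % 2 : Nat) : Int) ++ acc)
decreasing_by exact Nat.div_lt_self (by omega) (by omega)

-- one loop body: validate the part and convert it; none = the early 'return "Invalid IP address"'
def pvB_conv (p : List Char) : Option (List Char) :=
  if !pvStrIsdigit p then none
  else
    let n : Int := (PySem.Int.ofChars? p).getD 0   -- int(p), exact: p.isdigit() holds
    if n > 255 ∨ (PySem.List.pyGet? p 0 = some '0' ∧ PySem.List.len p > 1) then none
    else some (pvRjust8 (pvB_bits n.toNat []))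

-- the for-loop over parts with early return
def pvB_dec : List (List Char) → Option (List (List Char))
  | [] => some []
  | p :: rest =>
    match pvB_conv p with
    | none => none
    | some s => match pvB_dec rest with
      | none => none
      | some out => some (s :: out)

def ip_convert_alt (ip : String) : String :=
  let parts := PySem.Chars.splitOn ip.toList ['.']
  if parts.all (fun p => p.all (fun c => c == '0' || c == '1')) then
    String.mk (PySem.Chars.join ['.'] (parts.map (fun p => PySem.Int.toChars (pvB_btd p))))
  else if parts.length ≠ 4 then String.mk pvInvalid
  else match pvB_dec parts with
    | none => String.mk pvInvalid
    | some out => String.mk (PySem.Chars.join ['.'] out)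

-- ===== PRECONDITION & SPEC =====
def Spec_ip_convert (ip : String) (out : String) : Prop := out = ip_convert_alt ip
instance (ip : String) (out : String) : Decidable (Spec_ip_convert ip out) := by unfold Spec_ip_convert; infer_instance

-- ===== CLAIM (what is proved, stated in full; the proofs are below) =====
def Claim_equal_ip_convert : Prop := ∀ (ip : String), Dom_ip_convert ip → Spec_ip_convert ip (ip_convert ip)

-- ===== LEMMAS AND PROOFS =====
lemma digit_not_space (c : Char) (h : PySem.Chars.isdigit c = true) : PySem.Int.isIntSpace c = false := by
  simp only [PySem.Chars.isdigit, Bool.and_eq_true, decide_eq_true_eq] at h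
  simp only [PySem.Int.isIntSpace, Bool.or_eq_false_iff, decide_eq_false_iff_not]
  refine ⟨⟨⟨⟨⟨?_, ?_⟩, ?_⟩, ?_⟩, ?_⟩, ?_⟩ <;> rintro rfl <;> revert h <;> decide

lemma dropWhile_digits (l : List Char) (hd : ∀ c ∈ l, PySem.Chars.isdigit c) :
    List.dropWhile PySem.Int.isIntSpace l = l := by
  cases l with
  | nil => rfl
  | cons c t => rw [List.dropWhile_cons_of_neg]; simp [digit_not_space c (hd c (by simp))]

lemma opt_nonneg (x : Option Nat) :
    0 ≤ (Option.map (fun n : Int => n) (do let a ← x; pure ((a : Int)))).getD 0 := by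
  cases x <;> simp

lemma ofChars_digits_nonneg (p : List Char) (hne : p ≠ []) (hd : ∀ c ∈ p, PySem.Chars.isdigit c = true) :
    0 ≤ (PySem.Int.ofChars? p).getD 0 := by
  simp only [PySem.Int.ofChars?]
  rw [dropWhile_digits p hd, dropWhile_digits _ (by intro c hc; exact hd c (by simpa using hc))]
  rw [List.reverse_reverse]
  obtain ⟨c, t, rfl⟩ := List.exists_cons_of_ne_nil hne
  have hc := hd c (by simp)
  have hc0 : c ≠ '-' := by rintro rfl; revert hc; decide
  have hc1 : c ≠ '+' := by rintro rfl; revert hc; decide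
  split
  · next _ heq => injection heq with h1 _; exact absurd h1 hc0
  · next _ heq => injection heq with h1 _; exact absurd h1 hc1
  · exact opt_nonneg _

-- Horner: B's accumulator loop computes A's positional sum
lemma horner (l : List Char) (h : ∀ c ∈ l, c = '0' ∨ c = '1') (a : Int) :
    l.foldl (fun acc c => acc * 2 + (if c = '1' then 1 else 0)) a
      = a * 2 ^ l.length + pvBtd l := by
  induction l generalizing a with
  | nil => simp [pvBtd]
  | cons c rest ih =>
    rw [List.foldl_cons, ih (fun d hd => h d (by simp [hd]))]
    have hc : ((c.toNat : Int) - 48) = (if c = '1' then 1 else 0) := by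
      rcases h c (by simp) with rfl | rfl <;> decide
    simp only [pvBtd, List.length_cons, ← hc]
    ring

lemma btd_eq (l : List Char) (h : ∀ c ∈ l, c = '0' ∨ c = '1') : pvB_btd l = pvBtd l := by
  unfold pvB_btd; rw [horner l h 0]; ring

-- B's divmod loop produces A's recursive digit string (n ≥ 1)
lemma bits_eq (n : Nat) (hn : 1 ≤ n) : ∀ acc, pvB_bits n acc = pvDtb n ++ acc := by
  induction n using Nat.strong_induction_on with
  | _ n ih =>
    intro acc
    have hne : ¬ n = 0 := by omega
    rw [pvB_bits, if_neg hne]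
    by_cases h1 : n = 1
    · subst h1; rw [pvB_bits]; simp [pvDtb, show PySem.Int.toChars 1 = ['1'] from by decide]
    · rw [pvDtb, if_neg hne, if_neg h1]
      rw [ih (n / 2) (Nat.div_lt_self (by omega) (by omega)) (by omega)]
      simp

lemma dtb_head (n : Nat) : ∃ c r, pvDtb n = c :: r ∧ c ≠ '+' ∧ c ≠ '-' := by
  induction n using Nat.strong_induction_on with
  | _ n ih =>
    rw [pvDtb]
    rcases Nat.lt_or_ge n 2 with h2 | h2
    · interval_cases n
      · exact ⟨'0', [], by simp, by decide, by decide⟩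
      · exact ⟨'1', [], by simp, by decide, by decide⟩
    · have hne : ¬ n = 0 := by omega
      have hne1 : ¬ n = 1 := by omega
      simp only [hne, hne1, if_false]
      obtain ⟨c, r, heq, h1, h2'⟩ := ih (n / 2) (Nat.div_lt_self (by omega) (by omega))
      exact ⟨c, r ++ PySem.Int.toChars ((n % 2 : Nat) : Int), by rw [heq]; simp, h1, h2'⟩

lemma zfill_rjust (s : List Char) (h : ∀ c r, s = c :: r → c ≠ '+' ∧ c ≠ '-') :
    PySem.Chars.zfill s 8 = pvRjust8 s := by
  rw [PySem.Chars.zfill.eq_def, pvRjust8]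
  split
  · next hle =>
    have : 8 - s.length = 0 := by omega
    simp [this]
  · next hgt =>
    cases s with
    | nil => simp
    | cons c r =>
      obtain ⟨h1, h2⟩ := h c r rfl
      simp only [h1, h2, or_self, if_false]
      simp

lemma conv_eq (m : Nat) : PySem.Chars.zfill (pvDtb m) 8 = pvRjust8 (pvB_bits m []) := by
  rcases Nat.eq_zero_or_pos m with rfl | hm
  · rw [pvB_bits, pvDtb]
    decide
  · rw [bits_eq m hm []]
    simp only [List.append_nil]
    apply zfill_rjust
    intro c r heq
    obtain ⟨c', r', heq', h1, h2⟩ := dtb_head m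
    rw [heq'] at heq
    injection heq with e1 _
    subst e1
    exact ⟨h1, h2⟩

-- validate-and-convert in one pass equals A's validate-then-convert, per part
lemma pvB_conv_eq (p : List Char) :
    pvB_conv p = if pvIsValidPart p
      then some (PySem.Chars.zfill (pvDtb ((PySem.Int.ofChars? p).getD 0).toNat) 8)
      else none := by
  simp only [pvB_conv, pvIsValidPart]
  by_cases hd : pvStrIsdigit p = true
  · have hne : p ≠ [] := by
      intro h; rw [h] at hd; exact absurd hd (by decide)
    have hall : ∀ c ∈ p, PySem.Chars.isdigit c = true := by
      intro c hc
      have := (Bool.and_eq_true _ _).mp hd |>.2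
      exact List.all_eq_true.mp this c hc
    have hnn := ofChars_digits_nonneg p hne hall
    simp only [hd, Bool.not_true]
    split_ifs <;> first | rfl | (exfalso; omega) | tauto | simp [conv_eq]
  · simp only [Bool.not_eq_true] at hd
    simp [hd]

lemma pvB_dec_eq (l : List (List Char)) :
    pvB_dec l = if l.all pvIsValidPart
      then some (l.map (fun p => PySem.Chars.zfill (pvDtb ((PySem.Int.ofChars? p).getD 0).toNat) 8))
      else none := by
  induction l with
  | nil => simp [pvB_dec]
  | cons p rest ih =>
    rw [pvB_dec, pvB_conv_eq, ih]
    by_cases hp : pvIsValidPart p = true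
    · by_cases hr : rest.all pvIsValidPart = true
      · simp [hp, hr]
      · simp only [Bool.not_eq_true] at hr
        simp [hp, hr]
    · simp [Bool.not_eq_true] at hp
      simp [hp]

-- ===== VERDICT (by name: the statement is the Claim_ definition above) =====
theorem ip_convert_spec : Claim_equal_ip_convert := by
  intro ip _
  unfold Spec_ip_convert ip_convert ip_convert_alt pvIsBinaryIp pvIpToBinary pvIsValidIp
  by_cases hb : (PySem.Chars.splitOn ip.toList ['.']).all
      (fun p => p.all (fun c => c == '0' || c == '1')) = true
  · simp only [hb, if_true]
    congr 2
    apply List.map_congr_left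
    intro p hp
    have hall : ∀ c ∈ p, c = '0' ∨ c = '1' := by
      intro c hc
      have := List.all_eq_true.mp (List.all_eq_true.mp hb p hp) c hc
      simpa using this
    rw [btd_eq p hall]
  · simp only [Bool.not_eq_true] at hb
    simp only [hb, Bool.false_eq_true, if_false]
    by_cases h4 : (PySem.Chars.splitOn ip.toList ['.']).length = 4
    · simp only [h4, ne_eq, not_true_eq_false, if_false, pvB_dec_eq]
      by_cases hv : (PySem.Chars.splitOn ip.toList ['.']).all pvIsValidPart = true
      · simp [hv]
      · simp only [Bool.not_eq_true] at hv
        simp [hv]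
    · simp [h4]
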